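-- pv_equiv track=rewrite | github.com/crevetor/advent2020 | day15/main.py | last_indices
-- ===== SOURCE A (Python) =====
-- def last_indices(turns, number):
--     indices = []
--     for i, num in enumerate(reversed(turns)):
--         if number == num:
--             indices.append(len(turns)-i)
--             if len(indices) == 2:
--                 break
--     return indices
-- ===== SOURCE B (Python) =====
-- def last_indices(turns, number):
--     positions = [i + 1 for i, n in enumerate(turns) if n == number]
--     return list(reversed(positions))[:2]
-- ===== Notes on version B (the rewrite author's own statement) =====
-- stated objective: simpler
-- what changed: Builds the full list of 1-indexed occurrence positions in one forward comprehension and then selects the last two by reversing and slicing, instead of scanning the reversed list with an explicit accumulator and break.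
import Mathlib
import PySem

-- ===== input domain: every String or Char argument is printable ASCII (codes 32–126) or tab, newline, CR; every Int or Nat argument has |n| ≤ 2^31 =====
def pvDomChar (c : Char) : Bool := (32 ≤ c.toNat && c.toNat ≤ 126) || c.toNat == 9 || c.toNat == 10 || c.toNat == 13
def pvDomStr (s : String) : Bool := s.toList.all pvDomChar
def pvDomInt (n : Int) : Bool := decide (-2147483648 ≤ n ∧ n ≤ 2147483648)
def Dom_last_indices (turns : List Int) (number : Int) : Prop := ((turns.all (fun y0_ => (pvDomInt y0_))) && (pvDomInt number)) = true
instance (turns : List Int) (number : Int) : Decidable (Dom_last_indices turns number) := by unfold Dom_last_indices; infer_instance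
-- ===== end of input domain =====

-- B builds all 1-indexed occurrence positions in one forward pass and slices the last two,
-- instead of A's reversed scan with an accumulator and break (objective: simpler).


-- ===== PORT A =====
-- loop over enumerate(reversed(turns)) with the accumulator `indices`, breaking at length 2
def lastIndicesLoop (number : Int) (len : Int) : List (Int × Int) → List Int → List Int
  | [], indices => indices
  | (i, num) :: rest, indices =>
    if number == num then
      let indices' := indices ++ [len - i]
      if indices'.length == 2 then indices'
      else lastIndicesLoop number len rest indices'
    else lastIndicesLoop number len rest indices

def last_indices (turns : List Int) (number : Int) : List Int :=
  lastIndicesLoop number (turns.length : Int) (PySem.List.enumerate turns.reverse 0) []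

-- ===== PORT B =====
def last_indices_alt (turns : List Int) (number : Int) : List Int :=
  PySem.List.slice (((PySem.List.enumerate turns 0).filter (fun p => p.2 == number)).map (fun p => p.1 + 1)).reverse none (some 2)

-- ===== PRECONDITION & SPEC =====
def Spec_last_indices (turns : List Int) (number : Int) (out : List Int) : Prop := out = last_indices_alt turns number
instance (turns : List Int) (number : Int) (out : List Int) : Decidable (Spec_last_indices turns number out) := by unfold Spec_last_indices; infer_instance

-- ===== CLAIM (what is proved, stated in full; the proofs are below) =====
def Claim_equal_last_indices : Prop := ∀ (turns : List Int) (number : Int), Dom_last_indices turns number → Spec_last_indices turns number (last_indices turns number)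

-- ===== LEMMAS AND PROOFS =====

-- A's loop with a short accumulator returns the first two collected values
lemma loop_eq (number L : Int) : ∀ (es : List (Int × Int)) (acc : List Int), acc.length < 2 →
    lastIndicesLoop number L es acc
      = (acc ++ (es.filter (fun p => number == p.2)).map (fun p => L - p.1)).take 2 := by
  intro es
  induction es with
  | nil =>
      intro acc h
      simp [lastIndicesLoop, List.take_of_length_le (by omega : acc.length ≤ 2)]
  | cons e rest ih =>
      intro acc h
      obtain ⟨i, num⟩ := e
      cases hb : (number == num) with
      | false =>
          simp only [lastIndicesLoop, hb, Bool.false_eq_true, if_false]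
          rw [ih acc h, List.filter_cons_of_neg (by simp [hb])]
      | true =>
          simp only [lastIndicesLoop, hb, if_true]
          rw [List.filter_cons_of_pos (by simp [hb]), List.map_cons]
          have hassoc : acc ++ (L - i) :: List.map (fun p => L - p.1) (List.filter (fun p => number == p.2) rest)
              = (acc ++ [L - i]) ++ List.map (fun p => L - p.1) (List.filter (fun p => number == p.2) rest) := by
            simp
          cases h2 : ((acc ++ [L - i]).length == 2) with
          | true =>
              simp only [h2, if_true]
              have hlen : (acc ++ [L - i]).length = 2 := by simpa using h2
              rw [hassoc, ← hlen, List.take_left]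
          | false =>
              simp only [h2, Bool.false_eq_true, if_false]
              have hlt : (acc ++ [L - i]).length < 2 := by
                have h2' : (acc ++ [L - i]).length ≠ 2 := by simpa using h2
                simp only [List.length_append, List.length_cons, List.length_nil] at h2' ⊢
                omega
              rw [ih _ hlt, hassoc]

-- enumerate of a reversed list, in terms of enumerate of the list
lemma enum_rev (xs : List Int) : ∀ (s t : Int),
    PySem.List.enumerate xs.reverse s
      = ((PySem.List.enumerate xs t).map (fun p => (s + t + (xs.length : Int) - 1 - p.1, p.2))).reverse := by
  induction xs with
  | nil => intro s t; simp [PySem.List.enumerate_nil]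
  | cons y ys ih =>
      intro s t
      rw [List.reverse_cons, PySem.List.enumerate_append, PySem.List.enumerate_cons,
          PySem.List.enumerate_nil, PySem.List.enumerate_cons]
      simp only [List.map_cons, List.reverse_cons, List.length_reverse, List.length_cons]
      rw [ih s (t + 1)]
      push_cast
      have hfun : (fun p : Int × Int => (s + (t + 1) + (ys.length : Int) - 1 - p.1, p.2))
          = (fun p : Int × Int => (s + t + ((ys.length : Int) + 1) - 1 - p.1, p.2)) := by
        funext p
        simp only [Prod.mk.injEq, and_true]
        ring
      rw [hfun]
      congr 2
      ring

theorem last_indices_spec : Claim_equal_last_indices := by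
  intro turns number _
  unfold Spec_last_indices last_indices last_indices_alt
  rw [loop_eq number (turns.length : Int) _ [] (by simp)]
  rw [enum_rev turns 0 0]
  rw [show (some (2 : Int)) = some ((2 : Nat) : Int) by norm_num]
  rw [PySem.List.slice_to_natCast]
  simp only [List.nil_append, List.filter_reverse, List.map_reverse, List.filter_map, List.map_map]
  congr 2
  have hm : ((fun p : Int × Int => (turns.length : Int) - p.1) ∘ fun p : Int × Int => (0 + 0 + (turns.length : Int) - 1 - p.1, p.2))
      = fun p : Int × Int => p.1 + 1 := by
    funext p
    simp only [Function.comp_apply]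
    ring
  have hp : ((fun p : Int × Int => number == p.2) ∘ fun p : Int × Int => (0 + 0 + (turns.length : Int) - 1 - p.1, p.2))
      = fun p : Int × Int => p.2 == number := by
    funext p
    simp only [Function.comp_apply]
    simp [beq_iff_eq, eq_comm]
  rw [hm, hp]
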